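-- pv_equiv track=rewrite | github.com/AndrewShepherd/leetcode-python | max-score-after-applying-operations-on-a-tree/max_operations.py | maximumScoreAfterOperations
-- ===== SOURCE A (Python) =====
-- from collections import defaultdict
--
-- def generate_sorted_list(relationships, n: int) -> list[tuple]:
--
--
--     visited = [False] * n
--     visited[0] = True
--     sorted_list = [(0,None)]
--     i = 0
--     while i < len(sorted_list):
--         node, parent = sorted_list[i]
--         child_indexes = [c for c in relationships[node] if not visited[c]]
--         for c in child_indexes:
--             visited[c] = True
--             sorted_list.append((c, node))
--         i += 1
--     return sorted_list
--
-- def maximumScoreAfterOperations(edges: list[list[int]], values: list[int]) -> int: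
--     graph = defaultdict(list)
--     for e1, e2 in edges:
--         graph[e1].append(e2)
--         graph[e2].append(e1)
--
--     sorted_list = generate_sorted_list(graph, len(values))
--     # (sum_total, best_without_constraint)
--     results = [None] * len(values)
--
--
--     while(sorted_list):
--         node_index, node_parent = sorted_list.pop()
--         children = [c for c in graph[node_index] if results[c] != None]
--         child_sum_total = sum([results[c][0] for c in children])
--         child_with_constraints = sum([results[c][1] for c in children])
--         this_sum_total = values[node_index] + child_sum_total
--         if len(children) == 0:
--             this_with_constraints = 0
--         else:
--             this_with_constraints = max(child_sum_total, values[node_index] + child_with_constraints)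
--         results[node_index] = (this_sum_total, this_with_constraints)
--
--     return results[0][1]
--
--
--     return 0
-- ===== SOURCE B (Python) =====
-- from collections import defaultdict
--
-- def maximumScoreAfterOperations(edges: list[list[int]], values: list[int]) -> int:
--     graph = defaultdict(list)
--     for e1, e2 in edges:
--         graph[e1].append(e2)
--         graph[e2].append(e1)
--
--     def dfs(node, parent):
--         # returns (subtree_sum, best_score_keeping_path_to_each_leaf_nonzero)
--         child_sum = 0
--         child_keep = 0
--         has_child = False
--         for c in graph[node]:
--             if c == parent:
--                 continue
--             has_child = True
--             c_sum, c_keep = dfs(c, node)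
--             child_sum += c_sum
--             child_keep += c_keep
--         total = values[node] + child_sum
--         if not has_child:
--             return (total, 0)
--         return (total, max(child_sum, values[node] + child_keep))
--
--     return dfs(0, None)[1]
-- ===== Notes on version B (the rewrite author's own statement) =====
-- stated objective: alternative
-- what changed: A builds an explicit BFS ordering list with visited/results arrays and then runs the DP by popping that list from the end; B replaces both passes by one recursive post-order DFS (dfs(node, parent) skipping the parent) that combines child results on the way back up, keeping no ordering list or arrays.
-- outside the precondition, e.g. on maximumScoreAfterOperations([[0, 1], [1, 2], [2, 0]], [1, 1, 1]): A returns 3, B raises RecursionError; on maximumScoreAfterOperations([[0, 0]], [5]): A returns 0, B returns 10; on maximumScoreAfterOperations([[0, -1], [-1, 2]], [5, 7, 9]): A returns 9, B returns 18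
import Mathlib
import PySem

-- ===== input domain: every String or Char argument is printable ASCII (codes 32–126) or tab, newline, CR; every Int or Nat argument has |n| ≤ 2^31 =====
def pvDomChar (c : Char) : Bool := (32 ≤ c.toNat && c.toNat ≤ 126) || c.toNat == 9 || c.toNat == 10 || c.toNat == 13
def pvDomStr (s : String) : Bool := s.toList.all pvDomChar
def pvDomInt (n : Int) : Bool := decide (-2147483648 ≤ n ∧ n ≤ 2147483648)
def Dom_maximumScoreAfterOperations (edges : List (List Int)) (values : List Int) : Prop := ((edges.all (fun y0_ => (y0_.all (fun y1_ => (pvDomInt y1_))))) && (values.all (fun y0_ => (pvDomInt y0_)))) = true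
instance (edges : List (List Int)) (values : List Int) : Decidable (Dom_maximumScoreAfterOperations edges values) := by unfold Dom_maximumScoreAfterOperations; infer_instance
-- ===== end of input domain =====

-- B replaces A's explicit BFS ordering pass + reverse array DP by one recursive post-order DFS (alternative decomposition, same asymptotic cost).


-- ===== PORT A =====
-- graph = defaultdict(list); for e1, e2 in edges: graph[e1].append(e2); graph[e2].append(e1)
-- (shared by both ports: Source B builds its adjacency with the identical loop).  A non-pair edge
-- raises ValueError in Python (excluded by Pre_); the port skips it there.
def pvAdj (edges : List (List Int)) : PySem.Dict Int (List Int) :=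
  edges.foldl (fun g e =>
    match e with
    | [a, b] => (g.modify a [] (· ++ [b])).modify b [] (· ++ [a])
    | _ => g) PySem.Dict.empty

-- the while-loop of generate_sorted_list; fuel = total number of scans (≤ n inside Pre_,
-- a totality guard only).  visited[c] / visited[c] = True are exact for 0 ≤ c < n (Pre_);
-- Python additionally wraps negative c, which Pre_ excludes.
def pvBfsLoop (g : PySem.Dict Int (List Int)) (fuel : Nat) (vis : List Bool)
    (sl : List (Int × Option Int)) (i : Nat) : List (Int × Option Int) :=
  match fuel with
  | 0 => sl
  | f + 1 =>
    if h : i < sl.length then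
      let node := (sl[i]'h).1
      let cs := (g.getD node []).filter (fun c => !(vis.getD c.toNat false))
      pvBfsLoop g f (cs.foldl (fun w c => w.set c.toNat true) vis)
        (sl ++ cs.map (fun c => (c, some node))) (i + 1)
    else sl

def pvGenerateSortedList (g : PySem.Dict Int (List Int)) (n : Nat) : List (Int × Option Int) :=
  pvBfsLoop g n ((List.replicate n false).set 0 true) [((0 : Int), (none : Option Int))] 0

-- one iteration of A's DP while-loop (pop from the end of sorted_list); results[c] reads are
-- exact for in-range c (Pre_)
def pvDpStep (g : PySem.Dict Int (List Int)) (values : List Int)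
    (res : List (Option (Int × Int))) (entry : Int × Option Int) : List (Option (Int × Int)) :=
  let node := entry.1
  let children := (g.getD node []).filter (fun c => (res.getD c.toNat none).isSome)
  let cst := (children.map (fun c => ((res.getD c.toNat none).getD (0, 0)).1)).sum
  let cwc := (children.map (fun c => ((res.getD c.toNat none).getD (0, 0)).2)).sum
  let tst := values.getD node.toNat 0 + cst
  let twc := if children.length = 0 then 0 else max cst (values.getD node.toNat 0 + cwc)
  res.set node.toNat (some (tst, twc))

def maximumScoreAfterOperations (edges : List (List Int)) (values : List Int) : Int :=
  let g := pvAdj edges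
  let sl := pvGenerateSortedList g values.length
  let res := (sl.reverse).foldl (pvDpStep g values) (List.replicate values.length (none : Option (Int × Int)))
  ((res.getD 0 none).getD (0, 0)).2

-- ===== PORT B =====
-- recursive post-order DFS of Source B; fuel (n+1, enough for any root path inside Pre_) is a
-- totality guard only — Python recurses without it.  The child loop is Source B's for-loop over
-- graph[node] with its (child_sum, child_keep, has_child) accumulator.
def pvDfs (g : PySem.Dict Int (List Int)) (values : List Int) (fuel : Nat)
    (node : Int) (parent : Option Int) : Option (Int × Int) :=
  match fuel with
  | 0 => none
  | f + 1 =>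
    match (g.getD node []).foldl (fun acc c =>
        match acc with
        | none => none
        | some (cs, ck, hc) =>
          if some c = parent then some (cs, ck, hc)
          else
            match pvDfs g values f c (some node) with
            | none => none
            | some r => some (cs + r.1, ck + r.2, true)) (some ((0 : Int), (0 : Int), false)) with
    | none => none
    | some (cs, ck, hc) =>
      some (values.getD node.toNat 0 + cs,
            if hc then max cs (values.getD node.toNat 0 + ck) else 0)

def maximumScoreAfterOperations_alt (edges : List (List Int)) (values : List Int) : Int :=
  let g := pvAdj edges
  match pvDfs g values (values.length + 1) 0 none with
  | some r => r.2
  | none => 0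

-- ===== PRECONDITION & SPEC =====
-- e = [a, b] as the (unordered) simple edge (min, max); none for a malformed edge
def pvNormE (e : List Int) : Option (Int × Int) :=
  match e with
  | [a, b] => some (min a b, max a b)
  | _ => none

-- every edge in both directions, in input order (the incidence stream behind the adjacency dict)
def pvDirected (edges : List (List Int)) : List (Int × Int) :=
  edges.foldl (fun acc e =>
    match e with
    | [a, b] => acc ++ [(a, b), (b, a)]
    | _ => acc) []

-- one round of closing a vertex set under the edges
def pvExpand (edges : List (List Int)) (S : PySem.Set Int) : PySem.Set Int :=
  (pvDirected edges).foldl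
    (fun s p => if p.1 ∈ s ∨ p.2 ∈ s then PySem.Set.add (PySem.Set.add s p.2) p.1 else s) S

-- the connected component of node 0 (as the distinct vertex list)
def pvReach (edges : List (List Int)) : PySem.Set Int :=
  (pvExpand edges)^[2 * edges.length + 1] [0]

-- the edges touching the component of node 0
def pvCompE (edges : List (List Int)) : List (List Int) :=
  edges.filter (fun e => decide (e.getD 0 0 ∈ pvReach edges ∨ e.getD 1 0 ∈ pvReach edges))

-- the simple edges inside the component of node 0
def pvCompEdges (edges : List (List Int)) : List (Int × Int) :=
  (pvCompE edges).filterMap pvNormE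

-- Pre_ excludes inputs on which A raises (empty values, an edge that is not a pair) and inputs
-- whose edges TOUCHING the component of node 0 are malformed — a negative entry there (A returns
-- a value produced by Python's negative-index wraparound aliasing two node labels), a self-loop,
-- a repeated edge or a cycle (there A's BFS order double-counts revisited nodes while B's
-- recursion does not terminate); inside Pre_ the component of node 0 is a well-formed tree,
-- while edges not connected to node 0 (which neither program ever walks) are unconstrained.
def Pre_maximumScoreAfterOperations (edges : List (List Int)) (values : List Int) : Prop :=
  0 < values.length ∧
  (∀ e ∈ edges, e.length = 2) ∧
  (∀ e ∈ pvCompE edges, 0 ≤ e.getD 0 0 ∧ e.getD 0 0 < (values.length : Int) ∧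
      0 ≤ e.getD 1 0 ∧ e.getD 1 0 < (values.length : Int) ∧ e.getD 0 0 ≠ e.getD 1 0) ∧
  (pvCompEdges edges).Nodup ∧
  (pvCompEdges edges).length + 1 ≤ (pvReach edges).length

instance (edges : List (List Int)) (values : List Int) :
    Decidable (Pre_maximumScoreAfterOperations edges values) := by
  unfold Pre_maximumScoreAfterOperations; infer_instance

def pvWitness_maximumScoreAfterOperations : List (List Int) × List Int :=
  ([[0, 1]], [1, 2])

def Spec_maximumScoreAfterOperations (edges : List (List Int)) (values : List Int) (out : Int) : Prop :=
  out = maximumScoreAfterOperations_alt edges values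
instance (edges : List (List Int)) (values : List Int) (out : Int) :
    Decidable (Spec_maximumScoreAfterOperations edges values out) := by
  unfold Spec_maximumScoreAfterOperations; infer_instance

-- ===== CLAIM (what is proved, stated in full; the proofs are below) =====
def Claim_equal_maximumScoreAfterOperations : Prop :=
  ∀ (edges : List (List Int)) (values : List Int),
    Dom_maximumScoreAfterOperations edges values →
    Pre_maximumScoreAfterOperations edges values →
    Spec_maximumScoreAfterOperations edges values (maximumScoreAfterOperations edges values)

-- ===== LEMMAS AND PROOFS =====

-- ---------- Section 1: the adjacency dictionary as the directed incidence stream ----------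

theorem pv_directed_acc (edges : List (List Int)) (acc : List (Int × Int)) :
    edges.foldl (fun acc e =>
      match e with
      | [a, b] => acc ++ [(a, b), (b, a)]
      | _ => acc) acc = acc ++ pvDirected edges := by
  induction edges generalizing acc with
  | nil => simp [pvDirected]
  | cons e t ih =>
    rcases e with _ | ⟨a, _ | ⟨b, _ | ⟨c, r⟩⟩⟩ <;>
      simp only [pvDirected, List.foldl_cons] <;>
      rw [ih] <;> (try rw [ih]) <;> simp

theorem pv_directed_cons (e : List Int) (t : List (List Int)) :
    pvDirected (e :: t) = (match e with
      | [a, b] => [(a, b), (b, a)]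
      | _ => []) ++ pvDirected t := by
  rcases e with _ | ⟨a, _ | ⟨b, _ | ⟨c, r⟩⟩⟩ <;>
    simp only [pvDirected, List.foldl_cons] <;> rw [pv_directed_acc] <;> simp [pvDirected]

theorem pv_mem_directed (edges : List (List Int)) (x y : Int) :
    (x, y) ∈ pvDirected edges ↔ ([x, y] ∈ edges ∨ [y, x] ∈ edges) := by
  induction edges with
  | nil => simp [pvDirected]
  | cons e t ih =>
    rw [pv_directed_cons]
    rcases e with _ | ⟨a, _ | ⟨b, _ | ⟨c, r⟩⟩⟩ <;>
      simp_all [List.mem_cons, Prod.ext_iff] <;> aesop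

theorem pv_directed_symm (edges : List (List Int)) (x y : Int) :
    (x, y) ∈ pvDirected edges → (y, x) ∈ pvDirected edges := by
  rw [pv_mem_directed, pv_mem_directed]; tauto

theorem pv_adj_acc (edges : List (List Int)) (d : PySem.Dict Int (List Int)) (v : Int) :
    (edges.foldl (fun g e =>
      match e with
      | [a, b] => (g.modify a [] (· ++ [b])).modify b [] (· ++ [a])
      | _ => g) d).getD v []
    = d.getD v [] ++ ((pvDirected edges).filter (fun p => p.1 == v)).map Prod.snd := by
  induction edges generalizing d with
  | nil => simp [pvDirected]
  | cons e t ih =>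
    rw [pv_directed_cons]
    rcases e with _ | ⟨a, _ | ⟨b, _ | ⟨c, r⟩⟩⟩
    · simpa using ih d
    · simpa using ih d
    · simp only [List.foldl_cons]
      rw [ih]
      by_cases hvb : v = b <;> by_cases hva : v = a
      · subst hvb; subst hva
        simp [PySem.Dict.getD_modify]
      · subst hvb
        simp [PySem.Dict.getD_modify, Ne.symm hva, hva]
      · subst hva
        simp [PySem.Dict.getD_modify, Ne.symm hvb, hvb]
      · have ha : (a == v) = false := by simp [Ne.symm hva]
        have hb : (b == v) = false := by simp [Ne.symm hvb]
        simp [PySem.Dict.getD_modify, hva, hvb, ha, hb]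
    · simpa using ih d

theorem pv_adj_getD (edges : List (List Int)) (v : Int) :
    (pvAdj edges).getD v [] = ((pvDirected edges).filter (fun p => p.1 == v)).map Prod.snd := by
  simpa [pvAdj] using pv_adj_acc edges PySem.Dict.empty v

theorem pv_mem_nb (edges : List (List Int)) (v c : Int) :
    c ∈ (pvAdj edges).getD v [] ↔ (v, c) ∈ pvDirected edges := by
  rw [pv_adj_getD]
  constructor
  · rintro h
    rcases List.mem_map.1 h with ⟨p, hp, rfl⟩
    rcases List.mem_filter.1 hp with ⟨hm, he⟩
    have : p.1 = v := by simpa using he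
    rwa [show p = (v, p.2) from by cases p; simp_all] at hm
  · intro h
    exact List.mem_map.2 ⟨(v, c), List.mem_filter.2 ⟨h, by simp⟩, rfl⟩

theorem pv_count_filter_map (L : List (Int × Int)) (v c : Int) :
    ((L.filter (fun p => p.1 == v)).map Prod.snd).count c = L.count (v, c) := by
  induction L with
  | nil => simp
  | cons p t ih =>
    rcases p with ⟨x, y⟩
    by_cases hx : x = v <;> by_cases hy : y = c <;>
      simp [List.count_cons, hx, hy, ih, Prod.ext_iff]

theorem pv_count_nb (edges : List (List Int)) (v c : Int) :
    ((pvAdj edges).getD v []).count c = (pvDirected edges).count (v, c) := by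
  rw [pv_adj_getD, pv_count_filter_map]

theorem pv_count_directed (edges : List (List Int)) (v c : Int) (hvc : v ≠ c) :
    (pvDirected edges).count (v, c)
      = edges.countP (fun e => e = [v, c] ∨ e = [c, v]) := by
  induction edges with
  | nil => simp [pvDirected]
  | cons e t ih =>
    rw [pv_directed_cons, List.countP_cons]
    rcases e with _ | ⟨a, _ | ⟨b, _ | ⟨x, r⟩⟩⟩ <;>
      simp_all [List.count_append, List.count_cons, Prod.ext_iff] <;> aesop

theorem pv_countP_norm_zero (t : List (List Int)) (q : Int × Int)
    (h : q ∉ t.filterMap pvNormE) :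
    t.countP (fun e => pvNormE e = some q) = 0 := by
  rw [List.countP_eq_zero]
  intro e he hq
  exact h (List.mem_filterMap.2 ⟨e, he, by simpa using hq⟩)

theorem pv_countP_norm_le_one (edges : List (List Int)) (q : Int × Int)
    (h : (edges.filterMap pvNormE).Nodup) :
    edges.countP (fun e => pvNormE e = some q) ≤ 1 := by
  induction edges with
  | nil => simp
  | cons e t ih =>
    rw [List.countP_cons]
    rcases hfm : pvNormE e with _ | q'
    · have ht : (t.filterMap pvNormE).Nodup := by
        simpa [List.filterMap_cons, hfm] using h
      simp [hfm, ih ht]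
    · have hcons : (e :: t).filterMap pvNormE = q' :: t.filterMap pvNormE := by
        simp [List.filterMap_cons, hfm]
      rw [hcons] at h
      have ht := (List.nodup_cons.1 h).2
      by_cases hq : q' = q
      · subst hq
        rw [pv_countP_norm_zero t q' (List.nodup_cons.1 h).1]
        simp [hfm]
      · have hne : (decide (some q' = some q) = true) = False := by simp [hq]
        simp only [hfm, hne, if_false, Nat.add_zero]
        exact ih ht

theorem pv_countP_filter_eq (l : List (List Int)) (p q : List Int → Bool)
    (hpq : ∀ a, p a = true → q a = true) :
    l.countP p = (l.filter q).countP p := by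
  induction l with
  | nil => rfl
  | cons e t ih =>
    by_cases hp : p e = true
    · simp [List.filter_cons, hpq e hp, List.countP_cons, hp, ih]
    · by_cases hq : q e = true <;> simp [List.filter_cons, hq, List.countP_cons, hp, ih]

theorem pv_mem_compE (edges : List (List Int)) (e : List Int) :
    e ∈ pvCompE edges ↔ e ∈ edges ∧ (e.getD 0 0 ∈ pvReach edges ∨ e.getD 1 0 ∈ pvReach edges) := by
  simp [pvCompE, List.mem_filter]

theorem pv_comp_of_edge (edges : List (List Int)) (x y : Int) (h : [x, y] ∈ edges)
    (hxy : x ∈ pvReach edges ∨ y ∈ pvReach edges) : [x, y] ∈ pvCompE edges := by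
  rw [pv_mem_compE]
  exact ⟨h, by simpa using hxy⟩

theorem pv_nb_nodup (edges : List (List Int)) (n : Int)
    (hshape : ∀ e ∈ pvCompE edges, 0 ≤ e.getD 0 0 ∧ e.getD 0 0 < n ∧
      0 ≤ e.getD 1 0 ∧ e.getD 1 0 < n ∧ e.getD 0 0 ≠ e.getD 1 0)
    (hndC : (pvCompEdges edges).Nodup) (v : Int) (hv : v ∈ pvReach edges) :
    ((pvAdj edges).getD v []).Nodup := by
  rw [List.nodup_iff_count_le_one]
  intro c
  rw [pv_count_nb]
  by_cases hvc : v = c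
  · subst hvc
    have : (v, v) ∉ pvDirected edges := by
      rw [pv_mem_directed]
      rintro (h | h) <;>
        { have := hshape _ (pv_comp_of_edge edges v v h (Or.inl hv))
          simp at this }
    simp [List.count_eq_zero.2 this]
  · rw [pv_count_directed edges v c hvc]
    have hstep1 : edges.countP (fun e => e = [v, c] ∨ e = [c, v])
        = (pvCompE edges).countP (fun e => e = [v, c] ∨ e = [c, v]) := by
      rw [pvCompE]
      apply pv_countP_filter_eq
      intro a ha
      rcases (by simpa using ha : a = [v, c] ∨ a = [c, v]) with rfl | rfl <;> simp [hv]
    calc edges.countP (fun e => e = [v, c] ∨ e = [c, v])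
        = (pvCompE edges).countP (fun e => e = [v, c] ∨ e = [c, v]) := hstep1
      _ ≤ (pvCompE edges).countP (fun e => pvNormE e = some (min v c, max v c)) := by
          apply List.countP_mono_left
          rintro e he hor
          rcases (by simpa using hor) with rfl | rfl <;>
            simp [pvNormE, min_comm, max_comm]
      _ ≤ 1 := pv_countP_norm_le_one (pvCompE edges) _ (by simpa [pvCompEdges] using hndC)

theorem pv_nb_range (edges : List (List Int)) (n : Int)
    (hshape : ∀ e ∈ pvCompE edges, 0 ≤ e.getD 0 0 ∧ e.getD 0 0 < n ∧
      0 ≤ e.getD 1 0 ∧ e.getD 1 0 < n ∧ e.getD 0 0 ≠ e.getD 1 0)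
    (v c : Int) (hv : v ∈ pvReach edges) (h : c ∈ (pvAdj edges).getD v []) :
    0 ≤ v ∧ v < n ∧ 0 ≤ c ∧ c < n ∧ v ≠ c := by
  rw [pv_mem_nb, pv_mem_directed] at h
  rcases h with h | h
  · have := hshape _ (pv_comp_of_edge edges v c h (Or.inl hv))
    simp at this
    omega
  · have := hshape _ (pv_comp_of_edge edges c v h (Or.inr hv))
    simp at this
    omega

-- ---------- Section 2: the component of node 0 (pvReach) ----------

theorem pv_add_prefix (s : PySem.Set Int) (x : Int) : s <+: PySem.Set.add s x := by
  rw [PySem.Set.add_eq_ite]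
  split
  · exact List.prefix_refl _
  · exact List.prefix_append _ _

theorem pv_step_prefix (s : PySem.Set Int) (p : Int × Int) :
    s <+: (if p.1 ∈ s ∨ p.2 ∈ s then PySem.Set.add (PySem.Set.add s p.2) p.1 else s) := by
  split
  · exact (pv_add_prefix s p.2).trans (pv_add_prefix _ p.1)
  · exact List.prefix_refl _

theorem pv_foldl_prefix (L : List (Int × Int)) (S : PySem.Set Int) :
    S <+: L.foldl (fun s p => if p.1 ∈ s ∨ p.2 ∈ s then PySem.Set.add (PySem.Set.add s p.2) p.1 else s) S := by
  induction L generalizing S with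
  | nil => exact List.prefix_refl _
  | cons p t ih => exact (pv_step_prefix S p).trans (ih _)

theorem pv_foldl_mem (L : List (Int × Int)) (S : PySem.Set Int) (x : Int) (hx : x ∈ S) :
    x ∈ L.foldl (fun s p => if p.1 ∈ s ∨ p.2 ∈ s then PySem.Set.add (PySem.Set.add s p.2) p.1 else s) S :=
  (pv_foldl_prefix L S).subset hx

theorem pv_expand_prefix (edges : List (List Int)) (S : PySem.Set Int) :
    S <+: pvExpand edges S := pv_foldl_prefix _ _

theorem pv_foldl_nodup (L : List (Int × Int)) (S : PySem.Set Int) (hS : S.Nodup) :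
    (L.foldl (fun s p => if p.1 ∈ s ∨ p.2 ∈ s then PySem.Set.add (PySem.Set.add s p.2) p.1 else s) S).Nodup := by
  induction L generalizing S with
  | nil => exact hS
  | cons p t ih =>
    apply ih
    dsimp only
    split
    · exact PySem.Set.nodup_add _ _ (PySem.Set.nodup_add _ _ hS)
    · exact hS

theorem pv_foldl_closed_mem (L : List (Int × Int)) (S : PySem.Set Int) (x y : Int)
    (hp : (x, y) ∈ L) (hx : x ∈ S) :
    y ∈ L.foldl (fun s p => if p.1 ∈ s ∨ p.2 ∈ s then PySem.Set.add (PySem.Set.add s p.2) p.1 else s) S := by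
  induction L generalizing S with
  | nil => simp at hp
  | cons p t ih =>
    rcases List.mem_cons.1 hp with h | h
    · subst h
      rw [List.foldl_cons]
      apply pv_foldl_mem
      dsimp only
      rw [if_pos (Or.inl hx)]
      simp [PySem.Set.mem_add]
    · exact ih _ h ((pv_step_prefix S p).subset hx)

theorem pv_expand_closed_mem (edges : List (List Int)) (S : PySem.Set Int) (x y : Int)
    (hp : (x, y) ∈ pvDirected edges) (hx : x ∈ S) : y ∈ pvExpand edges S :=
  pv_foldl_closed_mem _ _ _ _ hp hx

theorem pv_foldl_subset (L : List (Int × Int)) (X : Set Int) (S : PySem.Set Int)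
    (hS : ∀ x ∈ S, x ∈ X)
    (hcl : ∀ p ∈ L, (p.1 ∈ X → p.2 ∈ X) ∧ (p.2 ∈ X → p.1 ∈ X)) :
    ∀ x ∈ L.foldl (fun s p => if p.1 ∈ s ∨ p.2 ∈ s then PySem.Set.add (PySem.Set.add s p.2) p.1 else s) S, x ∈ X := by
  induction L generalizing S with
  | nil => exact hS
  | cons p t ih =>
    apply ih
    · intro x hx
      dsimp only at hx
      split at hx
      · rename_i hcond
        rcases (PySem.Set.mem_add _ _ _).1 hx with hx2 | rfl
        · rcases (PySem.Set.mem_add _ _ _).1 hx2 with hx3 | rfl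
          · exact hS _ hx3
          · rcases hcond with hc | hc
            · exact (hcl p (by simp)).1 (hS _ hc)
            · exact hS _ hc
        · rcases hcond with hc | hc
          · exact hS _ hc
          · exact (hcl p (by simp)).2 (hS _ hc)
      · exact hS _ hx
    · intro q hq
      exact hcl q (by simp [hq])

theorem pv_expand_subset (edges : List (List Int)) (X : Set Int) (S : PySem.Set Int)
    (hS : ∀ x ∈ S, x ∈ X)
    (hcl : ∀ x y : Int, (x, y) ∈ pvDirected edges → x ∈ X → y ∈ X) :
    ∀ x ∈ pvExpand edges S, x ∈ X := by
  apply pv_foldl_subset _ X S hS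
  intro p hp
  exact ⟨fun h => hcl p.1 p.2 (by simpa using hp) h,
         fun h => hcl p.2 p.1 (pv_directed_symm _ _ _ (by simpa using hp)) h⟩

theorem pv_foldl_universe (L : List (Int × Int)) (S : PySem.Set Int) (D : List (Int × Int))
    (hsub : ∀ p ∈ L, p ∈ D) (hsym : ∀ x y : Int, (x, y) ∈ D → (y, x) ∈ D) :
    ∀ x ∈ L.foldl (fun s p => if p.1 ∈ s ∨ p.2 ∈ s then PySem.Set.add (PySem.Set.add s p.2) p.1 else s) S,
      x ∈ S ∨ x ∈ D.map Prod.fst := by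
  apply pv_foldl_subset L {x | x ∈ S ∨ x ∈ D.map Prod.fst} S (fun x hx => Or.inl hx)
  intro p hp
  constructor
  · intro _
    right
    exact List.mem_map.2 ⟨(p.2, p.1), hsym _ _ (by simpa using hsub p hp), rfl⟩
  · intro _
    right
    exact List.mem_map.2 ⟨p, hsub p hp, rfl⟩

theorem pv_expand_universe (edges : List (List Int)) (S : PySem.Set Int) :
    ∀ x ∈ pvExpand edges S, x ∈ S ∨ x ∈ (pvDirected edges).map Prod.fst :=
  pv_foldl_universe _ _ _ (fun p hp => hp) (fun x y h => pv_directed_symm _ _ _ h)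

theorem pv_directed_length (edges : List (List Int)) :
    (pvDirected edges).length ≤ 2 * edges.length := by
  induction edges with
  | nil => simp [pvDirected]
  | cons e t ih =>
    rw [pv_directed_cons]
    rcases e with _ | ⟨a, _ | ⟨b, _ | ⟨c, r⟩⟩⟩ <;> simp [List.length_append] <;> omega

theorem pv_chain_universe (edges : List (List Int)) (t : Nat) :
    ∀ x ∈ (pvExpand edges)^[t] ([0] : PySem.Set Int),
      x ∈ (0 : Int) :: (pvDirected edges).map Prod.fst := by
  induction t with
  | zero => simp
  | succ t ih =>
    rw [Function.iterate_succ_apply']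
    intro x hx
    rcases pv_expand_universe edges _ x hx with h | h
    · exact ih x h
    · exact List.mem_cons.2 (Or.inr h)

theorem pv_chain_nodup (edges : List (List Int)) (t : Nat) :
    ((pvExpand edges)^[t] ([0] : PySem.Set Int)).Nodup := by
  induction t with
  | zero => simp
  | succ t ih =>
    rw [Function.iterate_succ_apply']
    exact pv_foldl_nodup _ _ ih

theorem pv_chain_length_le (edges : List (List Int)) (t : Nat) :
    ((pvExpand edges)^[t] ([0] : PySem.Set Int)).length ≤ 2 * edges.length + 1 := by
  classical
  set l := (pvExpand edges)^[t] ([0] : PySem.Set Int) with hl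
  have hnd : l.Nodup := pv_chain_nodup edges t
  have hsub : l.toFinset ⊆ ((0 : Int) :: (pvDirected edges).map Prod.fst).toFinset := by
    intro x hx
    exact List.mem_toFinset.2 (pv_chain_universe edges t x (List.mem_toFinset.1 hx))
  calc l.length = l.toFinset.card := (List.toFinset_card_of_nodup hnd).symm
    _ ≤ ((0 : Int) :: (pvDirected edges).map Prod.fst).toFinset.card := Finset.card_le_card hsub
    _ ≤ ((0 : Int) :: (pvDirected edges).map Prod.fst).length := List.toFinset_card_le _
    _ ≤ 2 * edges.length + 1 := by
        simpa using pv_directed_length edges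

theorem pv_chain_grow (edges : List (List Int)) (t : Nat) :
    (∃ s ≤ t, pvExpand edges ((pvExpand edges)^[s] ([0] : PySem.Set Int)) = (pvExpand edges)^[s] ([0] : PySem.Set Int))
    ∨ t + 1 ≤ ((pvExpand edges)^[t] ([0] : PySem.Set Int)).length := by
  induction t with
  | zero => right; simp
  | succ t ih =>
    rcases ih with ⟨s, hs, hfix⟩ | hlen
    · exact Or.inl ⟨s, Nat.le_succ_of_le hs, hfix⟩
    · rcases pv_expand_prefix edges ((pvExpand edges)^[t] ([0] : PySem.Set Int)) with ⟨rest, hrest⟩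
      rcases List.eq_nil_or_concat' rest with rfl | _
      · left
        exact ⟨t, Nat.le_succ t, by simpa using hrest.symm⟩
      · right
        rw [Function.iterate_succ_apply', ← hrest]
        rename_i h
        rcases h with ⟨r2, x, rfl⟩
        simp [List.length_append]
        omega

theorem pv_fix_propagate (edges : List (List Int)) (s t : Nat) (hst : s ≤ t)
    (hfix : pvExpand edges ((pvExpand edges)^[s] ([0] : PySem.Set Int)) = (pvExpand edges)^[s] ([0] : PySem.Set Int)) :
    (pvExpand edges)^[t] ([0] : PySem.Set Int) = (pvExpand edges)^[s] ([0] : PySem.Set Int) := by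
  induction t with
  | zero => simpa [Nat.le_zero.1 hst]
  | succ t ih =>
    rcases Nat.lt_or_ge s (t + 1) with h | h
    · have ht := ih (Nat.lt_succ_iff.1 h)
      rw [Function.iterate_succ_apply', ht, hfix]
    · have : s = t + 1 := Nat.le_antisymm hst h
      simp [this]

theorem pv_reach_fix (edges : List (List Int)) :
    pvExpand edges (pvReach edges) = pvReach edges := by
  rcases pv_chain_grow edges (2 * edges.length + 1) with ⟨s, hs, hfix⟩ | hlen
  · have h1 := pv_fix_propagate edges s (2 * edges.length + 1) hs hfix
    unfold pvReach
    rw [h1, hfix]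
  · have := pv_chain_length_le edges (2 * edges.length + 1)
    omega

theorem pv_reach_nodup (edges : List (List Int)) : (pvReach edges).Nodup :=
  pv_chain_nodup edges _

theorem pv_zero_mem_reach (edges : List (List Int)) : (0 : Int) ∈ pvReach edges := by
  have : (0 : Int) ∈ ([0] : PySem.Set Int) := by simp
  unfold pvReach
  induction (2 * edges.length + 1) with
  | zero => simpa
  | succ t ih =>
    rw [Function.iterate_succ_apply']
    exact (pv_expand_prefix edges _).subset ih

theorem pv_reach_closed (edges : List (List Int)) (x y : Int)
    (hp : (x, y) ∈ pvDirected edges) (hx : x ∈ pvReach edges) : y ∈ pvReach edges := by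
  rw [← pv_reach_fix edges]
  exact pv_expand_closed_mem edges _ x y hp hx

theorem pv_reach_min (edges : List (List Int)) (X : Set Int) (h0 : (0 : Int) ∈ X)
    (hcl : ∀ x y : Int, (x, y) ∈ pvDirected edges → x ∈ X → y ∈ X) :
    ∀ x ∈ pvReach edges, x ∈ X := by
  unfold pvReach
  induction (2 * edges.length + 1) with
  | zero => simpa
  | succ t ih =>
    rw [Function.iterate_succ_apply']
    exact pv_expand_subset edges X _ ih hcl


-- ---------- Section 3: invariant of generate_sorted_list's while-loop ----------

structure PvInv (edges : List (List Int)) (n : Nat) (vis : List Bool)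
    (sl : List (Int × Option Int)) (i : Nat) : Prop where
  hvlen : vis.length = n
  hhead : sl.head? = some ((0 : Int), (none : Option Int))
  hilen : i ≤ sl.length
  hmem : ∀ v : Int, 0 ≤ v → v < (n : Int) →
    ((vis.getD v.toNat false) = true ↔ v ∈ sl.map Prod.fst)
  hnodup : (sl.map Prod.fst).Nodup
  hrange : ∀ p ∈ sl, (0 : Int) ≤ p.1 ∧ p.1 < (n : Int)
  hreach : ∀ p ∈ sl, p.1 ∈ pvReach edges
  hparent : ∀ j, (hj : j < sl.length) → 0 < j →
    ∃ i', ∃ (hi' : i' < sl.length), i' < j ∧ (sl[j]'hj).2 = some ((sl[i']'hi').1) ∧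
      (sl[j]'hj).1 ∈ (pvAdj edges).getD ((sl[i']'hi').1) []
  hscan : ∀ j, (hj : j < sl.length) → j < i →
    ∀ c ∈ (pvAdj edges).getD ((sl[j]'hj).1) [], c ∈ sl.map Prod.fst

theorem pv_ix_inj (F : List (Int × Option Int)) (h : (F.map Prod.fst).Nodup)
    (a b : Nat) (ha : a < F.length) (hb : b < F.length)
    (he : (F[a]'ha).1 = (F[b]'hb).1) : a = b := by
  have ha' : a < (F.map Prod.fst).length := by simpa using ha
  have hb' : b < (F.map Prod.fst).length := by simpa using hb
  have : (F.map Prod.fst)[a]'ha' = (F.map Prod.fst)[b]'hb' := by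
    simpa using he
  exact (List.Nodup.getElem_inj_iff h).1 this

theorem pv_len_le (n : Nat) (sl : List (Int × Option Int))
    (hnodup : (sl.map Prod.fst).Nodup)
    (hrange : ∀ p ∈ sl, (0 : Int) ≤ p.1 ∧ p.1 < (n : Int)) :
    sl.length ≤ n := by
  classical
  have h1 : sl.length = (sl.map Prod.fst).length := by simp
  have h2 : (sl.map Prod.fst).length = (sl.map Prod.fst).toFinset.card :=
    (List.toFinset_card_of_nodup hnodup).symm
  have h3 : (sl.map Prod.fst).toFinset ⊆ Finset.Ico (0 : Int) (n : Int) := by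
    intro x hx
    rcases List.mem_map.1 (List.mem_toFinset.1 hx) with ⟨p, hp, rfl⟩
    have := hrange p hp
    simp [Finset.mem_Ico]
    omega
  have h4 : (Finset.Ico (0 : Int) (n : Int)).card = n := by
    rw [Int.card_Ico]
    simp
  calc sl.length = (sl.map Prod.fst).toFinset.card := by rw [h1, h2]
    _ ≤ (Finset.Ico (0 : Int) (n : Int)).card := Finset.card_le_card h3
    _ = n := h4

-- marking a list of fresh in-range nodes visited
theorem pv_mark_length (cs : List Int) (vis : List Bool) :
    (cs.foldl (fun w c => w.set c.toNat true) vis).length = vis.length := by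
  induction cs generalizing vis with
  | nil => rfl
  | cons c t ih => simp [ih]

theorem pv_mark_getD (cs : List Int) (vis : List Bool) (n : Nat) (hv : vis.length = n)
    (hcs : ∀ c ∈ cs, (0 : Int) ≤ c ∧ c < (n : Int)) (v : Int) (h0 : 0 ≤ v) (h1 : v < (n : Int)) :
    ((cs.foldl (fun w c => w.set c.toNat true) vis).getD v.toNat false = true
      ↔ vis.getD v.toNat false = true ∨ v ∈ cs) := by
  induction cs generalizing vis with
  | nil => simp
  | cons c t ih =>
    have hc := hcs c (by simp)
    have hlen : (vis.set c.toNat true).length = n := by simp [hv]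
    have hrest : ∀ x ∈ t, (0 : Int) ≤ x ∧ x < (n : Int) := fun x hx => hcs x (by simp [hx])
    rw [List.foldl_cons, ih (vis.set c.toNat true) hlen hrest]
    by_cases hvc : v = c
    · subst hvc
      have hset : ((vis.set v.toNat true)[v.toNat]?).getD false = true := by
        rw [List.getElem?_set_self (by omega)]
        simp
      simp [List.getD_eq_getElem?_getD, hset]
    · have hne : v.toNat ≠ c.toNat := by omega
      have : (vis.set c.toNat true).getD v.toNat false = vis.getD v.toNat false := by
        rw [List.getD_eq_getElem?_getD, List.getD_eq_getElem?_getD,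
          List.getElem?_set_ne (by omega)]
      rw [this]
      simp [hvc]

theorem pv_bfs_step (edges : List (List Int)) (n : Nat)
    (hshape : ∀ e ∈ pvCompE edges, 0 ≤ e.getD 0 0 ∧ e.getD 0 0 < (n : Int) ∧
      0 ≤ e.getD 1 0 ∧ e.getD 1 0 < (n : Int) ∧ e.getD 0 0 ≠ e.getD 1 0)
    (hnd : (pvCompEdges edges).Nodup)
    (vis : List Bool) (sl : List (Int × Option Int)) (i : Nat)
    (inv : PvInv edges n vis sl i) (hi : i < sl.length) :
    PvInv edges n
      ((((pvAdj edges).getD ((sl[i]'hi).1) []).filter (fun c => !(vis.getD c.toNat false))).foldl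
        (fun w c => w.set c.toNat true) vis)
      (sl ++ (((pvAdj edges).getD ((sl[i]'hi).1) []).filter
        (fun c => !(vis.getD c.toNat false))).map (fun c => (c, some (sl[i]'hi).1)))
      (i + 1) := by
  classical
  set node := (sl[i]'hi).1 with hnode
  set cs := ((pvAdj edges).getD node []).filter (fun c => !(vis.getD c.toNat false)) with hcs
  have hnode_reach : node ∈ pvReach edges := inv.hreach _ (List.getElem_mem hi)
  have hcs_sub : ∀ c ∈ cs, c ∈ (pvAdj edges).getD node [] := by
    intro c hc; exact (List.mem_filter.1 hc).1
  have hcs_reach : ∀ c ∈ cs, c ∈ pvReach edges := by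
    intro c hc
    exact pv_reach_closed edges node c ((pv_mem_nb edges node c).1 (hcs_sub c hc)) hnode_reach
  have hcs_range : ∀ c ∈ cs, (0 : Int) ≤ c ∧ c < (n : Int) := by
    intro c hc
    have := pv_nb_range edges (n : Int) hshape node c hnode_reach (hcs_sub c hc)
    exact ⟨this.2.2.1, this.2.2.2.1⟩
  have hcs_new : ∀ c ∈ cs, c ∉ sl.map Prod.fst := by
    intro c hc hmem
    have hrg := hcs_range c hc
    have := (inv.hmem c hrg.1 hrg.2).2 hmem
    have hf := (List.mem_filter.1 hc).2
    rw [this] at hf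
    simp at hf
  have hcs_nodup : cs.Nodup :=
    (pv_nb_nodup edges (n : Int) hshape hnd node hnode_reach).filter _
  have hmapfst : (sl ++ cs.map (fun c => (c, some node))).map Prod.fst
      = sl.map Prod.fst ++ cs := by
    rw [List.map_append, List.map_map]
    have : (Prod.fst ∘ fun c : Int => (c, some node)) = id := rfl
    rw [this, List.map_id]
  refine ⟨?_, ?_, ?_, ?_, ?_, ?_, ?_, ?_, ?_⟩
  · rw [pv_mark_length, inv.hvlen]
  · rcases sl with _ | ⟨p, t⟩
    · simp at hi
    · simpa using inv.hhead
  · have : sl.length ≤ (sl ++ cs.map (fun c => (c, some node))).length := by simp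
    omega
  · intro v h0 h1
    rw [pv_mark_getD cs vis n inv.hvlen hcs_range v h0 h1, hmapfst]
    rw [inv.hmem v h0 h1]
    simp
  · rw [hmapfst]
    apply List.Nodup.append inv.hnodup hcs_nodup
    intro a ha hb
    exact hcs_new a hb ha
  · intro p hp
    rcases List.mem_append.1 hp with h | h
    · exact inv.hrange p h
    · rcases List.mem_map.1 h with ⟨c, hc, rfl⟩
      exact hcs_range c hc
  · intro p hp
    rcases List.mem_append.1 hp with h | h
    · exact inv.hreach p h
    · rcases List.mem_map.1 h with ⟨c, hc, rfl⟩
      exact hcs_reach c hc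
  · intro j hj hj0
    by_cases hjl : j < sl.length
    · rcases inv.hparent j hjl hj0 with ⟨i', hi', hlt, hp2, hnb⟩
      refine ⟨i', by simp; omega, hlt, ?_, ?_⟩
      · rw [List.getElem_append_left hjl, List.getElem_append_left hi']
        exact hp2
      · rw [List.getElem_append_left hjl, List.getElem_append_left hi']
        exact hnb
    · have hjge : sl.length ≤ j := Nat.le_of_not_lt hjl
      have hj' : j - sl.length < (cs.map (fun c => (c, some node))).length := by
        have := hj
        simp at this ⊢
        omega
      refine ⟨i, by simp; omega, by omega, ?_, ?_⟩
      · rw [List.getElem_append_right hjge, List.getElem_append_left hi]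
        simp only [List.getElem_map, ← hnode]
      · rw [List.getElem_append_right hjge, List.getElem_append_left hi]
        simp only [List.getElem_map, ← hnode]
        exact hcs_sub _ (List.getElem_mem _)
  · intro j hj hji c hc
    rw [hmapfst]
    rw [List.mem_append]
    by_cases hjl : j < sl.length
    · rcases Nat.lt_succ_iff_lt_or_eq.1 hji with hlt | heq
      · left
        rw [List.getElem_append_left hjl] at hc
        exact inv.hscan j hjl hlt c hc
      · subst heq
        rw [List.getElem_append_left hjl] at hc
        have hrg := pv_nb_range edges (n : Int) hshape node c hnode_reach (by rwa [← hnode] at hc)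
        by_cases hvis : vis.getD c.toNat false = true
        · left
          exact (inv.hmem c hrg.2.2.1 hrg.2.2.2.1).1 hvis
        · right
          rw [hcs]
          apply List.mem_filter.2
          rw [Bool.not_eq_true] at hvis
          refine ⟨by rwa [← hnode] at hc, ?_⟩
          rw [List.getD_eq_getElem?_getD] at hvis
          simpa using hvis
    · exfalso
      omega

theorem pv_bfs_run (edges : List (List Int)) (n : Nat)
    (hshape : ∀ e ∈ pvCompE edges, 0 ≤ e.getD 0 0 ∧ e.getD 0 0 < (n : Int) ∧
      0 ≤ e.getD 1 0 ∧ e.getD 1 0 < (n : Int) ∧ e.getD 0 0 ≠ e.getD 1 0)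
    (hnd : (pvCompEdges edges).Nodup) :
    ∀ (fuel : Nat) (vis : List Bool) (sl : List (Int × Option Int)) (i : Nat),
      PvInv edges n vis sl i → n - i ≤ fuel →
      ∃ visF, PvInv edges n visF (pvBfsLoop (pvAdj edges) fuel vis sl i)
        (pvBfsLoop (pvAdj edges) fuel vis sl i).length := by
  intro fuel
  induction fuel with
  | zero =>
    intro vis sl i inv hfuel
    have hlen := pv_len_le n sl inv.hnodup inv.hrange
    have : i = sl.length := by
      have := inv.hilen
      omega
    subst this
    exact ⟨vis, by simpa [pvBfsLoop] using inv⟩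
  | succ f ih =>
    intro vis sl i inv hfuel
    by_cases hi : i < sl.length
    · have hstep := pv_bfs_step edges n hshape hnd vis sl i inv hi
      have hrec := ih _ _ _ hstep (by
        have hlen := pv_len_le n sl inv.hnodup inv.hrange
        omega)
      rw [pvBfsLoop]
      simp only [dif_pos hi]
      exact hrec
    · have : i = sl.length := by
        have := inv.hilen
        omega
      subst this
      refine ⟨vis, ?_⟩
      rw [pvBfsLoop]
      simp only [dif_neg hi]
      exact inv


-- ---------- Section 4: the finished BFS list: soundness, completeness, tree dichotomy ----------

def pvN (x y : Int) : Int × Int := (min x y, max x y)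

theorem pv_pvN_comm (x y : Int) : pvN x y = pvN y x := by
  simp [pvN, min_comm, max_comm]

theorem pv_pvN_inj (x y x' y' : Int) (h : pvN x y = pvN x' y') :
    (x = x' ∧ y = y') ∨ (x = y' ∧ y = x') := by
  simp only [pvN, Prod.mk.injEq] at h
  rcases h with ⟨h1, h2⟩
  simp only [min_def, max_def] at h1 h2
  split_ifs at h1 h2 <;> omega

theorem pv_init_inv (edges : List (List Int)) (n : Nat) (hn : 0 < n) :
    PvInv edges n ((List.replicate n false).set 0 true)
      [((0 : Int), (none : Option Int))] 0 := by
  refine ⟨by simp, rfl, by simp, ?_, by simp, by simp; omega, ?_, ?_, ?_⟩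
  · intro v h0 h1
    constructor
    · intro h
      by_cases hv0 : v = 0
      · simp [hv0]
      · exfalso
        have hne : v.toNat ≠ 0 := by omega
        rw [List.getD_eq_getElem?_getD, List.getElem?_set_ne (by omega)] at h
        have : v.toNat < n := by omega
        rw [List.getElem?_replicate_of_lt this] at h
        simp at h
    · intro h
      have hv0 : v = (0 : Int) := by simpa using h
      subst hv0
      rw [List.getD_eq_getElem?_getD, show (0 : Int).toNat = 0 from rfl,
        List.getElem?_set_self (by simpa using hn)]
      simp
  · intro p hp
    have : p = ((0 : Int), (none : Option Int)) := by simpa using hp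
    rw [this]
    exact pv_zero_mem_reach edges
  · intro j hj hj0
    simp at hj
    omega
  · intro j hj hji
    omega

theorem pv_final_inv (edges : List (List Int)) (n : Nat)
    (hshape : ∀ e ∈ pvCompE edges, 0 ≤ e.getD 0 0 ∧ e.getD 0 0 < (n : Int) ∧
      0 ≤ e.getD 1 0 ∧ e.getD 1 0 < (n : Int) ∧ e.getD 0 0 ≠ e.getD 1 0)
    (hnd : (pvCompEdges edges).Nodup) (hn : 0 < n) :
    ∃ visF, PvInv edges n visF (pvGenerateSortedList (pvAdj edges) n)
      (pvGenerateSortedList (pvAdj edges) n).length := by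
  unfold pvGenerateSortedList
  exact pv_bfs_run edges n hshape hnd n _ _ 0 (pv_init_inv edges n hn) (by omega)

theorem pv_F_nonempty (edges : List (List Int)) (n : Nat) (visF : List Bool)
    (F : List (Int × Option Int)) (inv : PvInv edges n visF F F.length) :
    0 < F.length := by
  have := inv.hhead
  rcases F with _ | ⟨p, t⟩
  · simp at this
  · simp

theorem pv_F_zero (edges : List (List Int)) (n : Nat) (visF : List Bool)
    (F : List (Int × Option Int)) (inv : PvInv edges n visF F F.length)
    (h0 : 0 < F.length) : (F[0]'h0) = ((0 : Int), (none : Option Int)) := by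
  have := inv.hhead
  rcases F with _ | ⟨p, t⟩
  · simp at this
  · simpa using this

theorem pv_sound (edges : List (List Int)) (n : Nat) (visF : List Bool)
    (F : List (Int × Option Int)) (inv : PvInv edges n visF F F.length) :
    ∀ j, (hj : j < F.length) → (F[j]'hj).1 ∈ pvReach edges := by
  intro j hj
  exact inv.hreach _ (List.getElem_mem hj)

theorem pv_listed_iff (edges : List (List Int)) (n : Nat) (visF : List Bool)
    (F : List (Int × Option Int)) (inv : PvInv edges n visF F F.length) :
    ∀ c : Int, c ∈ F.map Prod.fst ↔ c ∈ pvReach edges := by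
  intro c
  constructor
  · intro h
    rcases List.mem_map.1 h with ⟨p, hp, rfl⟩
    rcases List.mem_iff_getElem.1 hp with ⟨k, hk, rfl⟩
    exact pv_sound edges n visF F inv k hk
  · intro h
    refine pv_reach_min edges {x | x ∈ F.map Prod.fst} ?_ ?_ c h
    · have h0 := pv_F_nonempty edges n visF F inv
      have := pv_F_zero edges n visF F inv h0
      have : (0 : Int) = (F[0]'h0).1 := by rw [this]
      rw [this]
      exact Set.mem_setOf.2 (List.mem_map.2 ⟨_, List.getElem_mem _, rfl⟩)
    · intro x y hxy hx
      rcases List.mem_map.1 hx with ⟨p, hp, rfl⟩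
      rcases List.mem_iff_getElem.1 hp with ⟨k, hk, rfl⟩
      exact inv.hscan k hk hk y ((pv_mem_nb edges _ _).2 hxy)

theorem pv_card_eq (edges : List (List Int)) (n : Nat) (visF : List Bool)
    (F : List (Int × Option Int)) (inv : PvInv edges n visF F F.length) :
    F.length = (pvReach edges).length := by
  have hperm : (F.map Prod.fst).Perm (pvReach edges) := by
    rw [List.perm_ext_iff_of_nodup inv.hnodup (pv_reach_nodup edges)]
    exact pv_listed_iff edges n visF F inv
  have := hperm.length_eq
  simpa using this

theorem pv_edge_mem_comp (edges : List (List Int)) (x y : Int)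
    (hnb : y ∈ (pvAdj edges).getD x []) (hx : x ∈ pvReach edges) :
    pvN x y ∈ pvCompEdges edges := by
  have hdir : (x, y) ∈ pvDirected edges := (pv_mem_nb edges x y).1 hnb
  rw [pvCompEdges]
  rcases (pv_mem_directed edges x y).1 hdir with h | h
  · exact List.mem_filterMap.2
      ⟨[x, y], pv_comp_of_edge edges x y h (Or.inl hx), by simp [pvNormE, pvN]⟩
  · exact List.mem_filterMap.2
      ⟨[y, x], pv_comp_of_edge edges y x h (Or.inr hx), by simp [pvNormE, pvN, min_comm, max_comm]⟩

theorem pv_p2 (edges : List (List Int)) (n : Nat) (visF : List Bool)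
    (F : List (Int × Option Int)) (inv : PvInv edges n visF F F.length)
    (hpre3 : (pvCompEdges edges).length + 1 ≤ (pvReach edges).length) :
    ∀ j, (hj : j < F.length) → ∀ c ∈ (pvAdj edges).getD ((F[j]'hj).1) [],
      (F[j]'hj).2 = some c ∨
      ∃ k, ∃ (hk : k < F.length), j < k ∧ (F[k]'hk).1 = c ∧ (F[k]'hk).2 = some ((F[j]'hj).1) := by
  classical
  intro j hj c hc
  by_cases hpj : (F[j]'hj).2 = some c
  · exact Or.inl hpj
  right
  have hcl : c ∈ F.map Prod.fst := inv.hscan j hj hj c hc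
  have : ∃ k, ∃ (hk : k < F.length), (F[k]'hk).1 = c := by
    rcases List.mem_map.1 hcl with ⟨p, hp, rfl⟩
    rcases List.mem_iff_getElem.1 hp with ⟨k, hk, rfl⟩
    exact ⟨k, hk, rfl⟩
  rcases this with ⟨k, hk, hkc⟩
  by_cases hkp : (F[k]'hk).2 = some ((F[j]'hj).1)
  · have hk0 : 0 < k := by
      rcases Nat.eq_zero_or_pos k with rfl | h
      · exfalso
        rw [pv_F_zero edges n visF F inv hk] at hkp
        simp at hkp
      · exact h
    rcases inv.hparent k hk hk0 with ⟨i', hi', hlt, hp2, _⟩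
    have heq : (F[i']'hi').1 = (F[j]'hj).1 := by
      rw [hp2] at hkp
      exact Option.some.inj hkp
    have : i' = j := pv_ix_inj F inv.hnodup i' j hi' hj heq
    exact ⟨k, hk, by omega, hkc, hkp⟩
  · exfalso
    -- counting: the BFS tree edges together with {F[j].1, c} are |F| distinct
    -- simple edges inside the component of 0, contradicting acyclicity
    set m := F.length with hm
    have hm1 : 0 < m := pv_F_nonempty edges n visF F inv
    set vnd : Nat → Int := fun l => (F.getD l ((0 : Int), (none : Option Int))).1 with hvnd
    set vpr : Nat → Int := fun l => ((F.getD l ((0 : Int), (none : Option Int))).2).getD 0 with hvpr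
    have hvnd_eq : ∀ l, (hl : l < m) → vnd l = (F[l]'hl).1 := by
      intro l hl
      simp [hvnd, List.getD_eq_getElem?_getD, List.getElem?_eq_getElem hl]
    have hpar : ∀ l, (hl : l < m) → 0 < l →
        ∃ i', ∃ (hi' : i' < m), i' < l ∧ vpr l = (F[i']'hi').1 ∧
          vnd l ∈ (pvAdj edges).getD ((F[i']'hi').1) [] := by
      intro l hl hl0
      rcases inv.hparent l hl hl0 with ⟨i', hi', hlt, hp2, hnb⟩
      refine ⟨i', hi', hlt, ?_, ?_⟩
      · simp [hvpr, List.getD_eq_getElem?_getD, List.getElem?_eq_getElem hl, hp2]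
      · rw [hvnd_eq l hl]
        exact hnb
    set φ : Nat → Int × Int :=
      fun l => if l = 0 then pvN ((F[j]'hj).1) c else pvN (vnd l) (vpr l) with hφ
    have hmaps : ∀ l ∈ Finset.range m, φ l ∈ (pvCompEdges edges).toFinset := by
      intro l hl
      rw [Finset.mem_range] at hl
      rw [List.mem_toFinset]
      by_cases hl0 : l = 0
      · simp only [hφ, hl0, if_pos rfl]
        exact pv_edge_mem_comp edges _ c hc (pv_sound edges n visF F inv j hj)
      · simp only [hφ, if_neg hl0]
        rcases hpar l hl (Nat.pos_of_ne_zero hl0) with ⟨i', hi', _, hpeq, hnb⟩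
        rw [hpeq, pv_pvN_comm]
        exact pv_edge_mem_comp edges _ _ hnb (pv_sound edges n visF F inv i' hi')
    have hinj : Set.InjOn φ (Finset.range m) := by
      have hvpr_some : ∀ l, (hl : l < m) → ∀ x : Int, (F[l]'hl).2 = some x → vpr l = x := by
        intro l hl x hx
        simp [hvpr, List.getD_eq_getElem?_getD, List.getElem?_eq_getElem hl, hx]
      have key : ∀ b, 0 < b → (hbm : b < m) → φ 0 = φ b → False := by
        intro b hb0 hbm hab
        have hbne : b ≠ 0 := by omega
        rcases inv.hparent b hbm hb0 with ⟨ib, hib, hltb, hpb, _⟩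
        have hprb : vpr b = (F[ib]'hib).1 := hvpr_some b hbm _ hpb
        have hab' : pvN ((F[j]'hj).1) c = pvN (vnd b) (vpr b) := by
          simp only [hφ, if_true, if_neg hbne] at hab
          exact hab
        rcases pv_pvN_inj _ _ _ _ hab' with ⟨h1, h2⟩ | ⟨h1, h2⟩
        · -- F[j].1 = F[b].1 and c = vpr b : then b = j and F[j].2 = some c
          have hjb : j = b := by
            apply pv_ix_inj F inv.hnodup j b hj hbm
            rw [hvnd_eq b hbm] at h1
            exact h1
          apply hpj
          have h22 : (F[j]'hj).2 = (F[b]'hbm).2 := by subst hjb; rfl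
          rw [h22, hpb, ← hprb, ← h2]
        · -- F[j].1 = vpr b and c = F[b].1 : then b = k and F[k].2 = some (F[j].1)
          have hbk : b = k := by
            apply pv_ix_inj F inv.hnodup b k hbm hk
            rw [hvnd_eq b hbm] at h2
            rw [← h2, hkc]
          apply hkp
          have h22 : (F[k]'hk).2 = (F[b]'hbm).2 := by subst hbk; rfl
          rw [h22, hpb, ← hprb, ← h1]
      intro a ha b hb hab
      simp only [Finset.coe_range, Set.mem_Iio] at ha hb
      rcases Nat.eq_zero_or_pos a with rfl | ha0 <;> rcases Nat.eq_zero_or_pos b with rfl | hb0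
      · rfl
      · exact absurd hab (key b hb0 hb)
      · exact absurd hab.symm (key a ha0 ha)
      · have hane : a ≠ 0 := by omega
        have hbne : b ≠ 0 := by omega
        rcases inv.hparent a ha ha0 with ⟨ia, hia, hlta, hpa, _⟩
        rcases inv.hparent b hb hb0 with ⟨ib, hib, hltb, hpb, _⟩
        have hpra : vpr a = (F[ia]'hia).1 := hvpr_some a ha _ hpa
        have hprb : vpr b = (F[ib]'hib).1 := hvpr_some b hb _ hpb
        have hab' : pvN (vnd a) (vpr a) = pvN (vnd b) (vpr b) := by
          simp only [hφ] at hab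
          rw [if_neg hane, if_neg hbne] at hab
          exact hab
        rcases pv_pvN_inj _ _ _ _ hab' with ⟨h1, h2⟩ | ⟨h1, h2⟩
        · apply pv_ix_inj F inv.hnodup a b ha hb
          rw [hvnd_eq a ha, hvnd_eq b hb] at h1
          exact h1
        · exfalso
          have hb1 : a = ib := by
            apply pv_ix_inj F inv.hnodup a ib ha hib
            rw [hvnd_eq a ha] at h1
            rw [h1, hprb]
          have hb2 : b = ia := by
            apply pv_ix_inj F inv.hnodup b ia hb hia
            rw [hvnd_eq b hb] at h2
            rw [← h2, hpra]
          omega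
    have hcard := Finset.card_le_card_of_injOn φ hmaps hinj
    rw [Finset.card_range] at hcard
    have h2 : (pvCompEdges edges).toFinset.card ≤ (pvCompEdges edges).length :=
      List.toFinset_card_le _
    have h3 := pv_card_eq edges n visF F inv
    omega


-- ---------- Section 5: the reverse DP pass computes the recursive DFS ----------

theorem pv_fold_none (g : PySem.Dict Int (List Int)) (values : List Int) (f : Nat)
    (node : Int) (parent : Option Int) (L : List Int) :
    L.foldl (fun acc c =>
      match acc with
      | none => none
      | some (cs, ck, hc) =>
        if some c = parent then some (cs, ck, hc)
        else
          match pvDfs g values f c (some node) with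
          | none => none
          | some r => some (cs + r.1, ck + r.2, true)) (none : Option (Int × Int × Bool)) = none := by
  induction L with
  | nil => rfl
  | cons c t ih => simpa using ih

theorem pv_dfs_mono (g : PySem.Dict Int (List Int)) (values : List Int) :
    ∀ (f f' : Nat) (node : Int) (parent : Option Int) (r : Int × Int),
      pvDfs g values f node parent = some r → f ≤ f' → pvDfs g values f' node parent = some r := by
  intro f
  induction f with
  | zero =>
    intro f' node parent r h
    simp [pvDfs] at h
  | succ f ih =>
    intro f' node parent r h hle
    rcases Nat.exists_eq_add_of_le hle with ⟨d, rfl⟩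
    have hY : f + 1 + d = (f + d) + 1 := by omega
    rw [hY]
    have aux : ∀ (L : List Int) (acc : Int × Int × Bool) (out : Int × Int × Bool),
        L.foldl (fun acc c =>
          match acc with
          | none => none
          | some (cs, ck, hc) =>
            if some c = parent then some (cs, ck, hc)
            else
              match pvDfs g values f c (some node) with
              | none => none
              | some r => some (cs + r.1, ck + r.2, true)) (some acc) = some out →
        L.foldl (fun acc c =>
          match acc with
          | none => none
          | some (cs, ck, hc) =>
            if some c = parent then some (cs, ck, hc)
            else
              match pvDfs g values (f + d) c (some node) with
              | none => none
              | some r => some (cs + r.1, ck + r.2, true)) (some acc) = some out := by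
      intro L
      induction L with
      | nil => intro acc out h; exact h
      | cons c t ihL =>
        intro acc out h
        rw [List.foldl_cons] at h ⊢
        by_cases hp : some c = parent
        · simp only [hp, if_pos rfl] at h ⊢
          · exact ihL acc out h
        · rcases hdc : pvDfs g values f c (some node) with _ | rc
          · rw [hdc] at h
            simp only [if_neg hp] at h
            rw [pv_fold_none] at h
            exact absurd h (by simp)
          · have hdc' : pvDfs g values (f + d) c (some node) = some rc :=
              ih (f + d) c (some node) rc hdc (by omega)
            rw [hdc] at h
            rw [hdc']
            simp only [if_neg hp] at h ⊢
            exact ihL _ out h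
    rw [pvDfs] at h
    rcases hfold : (g.getD node []).foldl (fun acc c =>
          match acc with
          | none => none
          | some (cs, ck, hc) =>
            if some c = parent then some (cs, ck, hc)
            else
              match pvDfs g values f c (some node) with
              | none => none
              | some r => some (cs + r.1, ck + r.2, true)) (some ((0 : Int), (0 : Int), false)) with _ | trip
    · rw [hfold] at h
      simp at h
    · rw [hfold] at h
      rw [pvDfs]
      rw [aux _ _ _ hfold]
      exact h

theorem pv_dfs_fold_char (g : PySem.Dict Int (List Int)) (values : List Int) (f : Nat)
    (node : Int) (parent : Option Int) (val : Int → Int × Int) :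
    ∀ (L : List Int),
      (∀ c ∈ L, ¬ (some c = parent) → pvDfs g values f c (some node) = some (val c)) →
      ∀ (s w : Int) (hc : Bool),
      L.foldl (fun acc c =>
        match acc with
        | none => none
        | some (cs, ck, hc) =>
          if some c = parent then some (cs, ck, hc)
          else
            match pvDfs g values f c (some node) with
            | none => none
            | some r => some (cs + r.1, ck + r.2, true)) (some (s, w, hc)) =
      some (s + ((L.filter (fun c => !(decide (some c = parent)))).map (fun c => (val c).1)).sum,
            w + ((L.filter (fun c => !(decide (some c = parent)))).map (fun c => (val c).2)).sum,
            hc || !(L.filter (fun c => !(decide (some c = parent)))).isEmpty) := by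
  intro L
  induction L with
  | nil => intro _ s w hc; simp
  | cons c t ihL =>
    intro h s w hc
    rw [List.foldl_cons]
    by_cases hp : some c = parent
    · have hfilter : (c :: t).filter (fun c => !(decide (some c = parent)))
          = t.filter (fun c => !(decide (some c = parent))) := by
        simp [List.filter_cons, hp]
      rw [hfilter]
      simp only [if_pos hp]
      exact ihL (fun x hx => h x (by simp [hx])) s w hc
    · have hdc := h c (by simp) hp
      have hfilter : (c :: t).filter (fun c => !(decide (some c = parent)))
          = c :: t.filter (fun c => !(decide (some c = parent))) := by
        simp [List.filter_cons, hp]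
      rw [hfilter]
      simp only [if_neg hp, hdc]
      rw [ihL (fun x hx => h x (by simp [hx])) (s + (val c).1) (w + (val c).2) true]
      simp [add_assoc]


theorem pv_dp_suffix (edges : List (List Int)) (values : List Int)
    (visF : List Bool) (F : List (Int × Option Int))
    (inv : PvInv edges values.length visF F F.length)
    (hshape : ∀ e ∈ pvCompE edges, 0 ≤ e.getD 0 0 ∧ e.getD 0 0 < (values.length : Int) ∧
      0 ≤ e.getD 1 0 ∧ e.getD 1 0 < (values.length : Int) ∧ e.getD 0 0 ≠ e.getD 1 0)
    (hnd : (pvCompEdges edges).Nodup)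
    (hpre3 : (pvCompEdges edges).length + 1 ≤ (pvReach edges).length) :
    ∀ (d t : Nat), t + d = F.length →
      (∀ j, (hj : j < F.length) → t ≤ j →
        (((F.drop t).foldr (fun e acc => pvDpStep (pvAdj edges) values acc e)
            (List.replicate values.length (none : Option (Int × Int)))).getD ((F[j]'hj).1).toNat none
          = pvDfs (pvAdj edges) values (F.length - j) ((F[j]'hj).1) ((F[j]'hj).2)
        ∧ (pvDfs (pvAdj edges) values (F.length - j) ((F[j]'hj).1) ((F[j]'hj).2)).isSome))
      ∧ (∀ u : Int, 0 ≤ u → u < (values.length : Int) →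
          (∀ j, (hj : j < F.length) → t ≤ j → (F[j]'hj).1 ≠ u) →
          ((F.drop t).foldr (fun e acc => pvDpStep (pvAdj edges) values acc e)
            (List.replicate values.length (none : Option (Int × Int)))).getD u.toNat none = none)
      ∧ ((F.drop t).foldr (fun e acc => pvDpStep (pvAdj edges) values acc e)
          (List.replicate values.length (none : Option (Int × Int)))).length = values.length := by
  intro d
  induction d with
  | zero =>
    intro t hT
    have ht : t = F.length := by omega
    subst ht
    rw [List.drop_length]
    refine ⟨?_, ?_, ?_⟩
    · intro j hj hle
      omega
    · intro u h0 h1 _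
      simp only [List.foldr_nil]
      rw [List.getD_eq_getElem?_getD, List.getElem?_replicate]
      split <;> simp
    · simp
  | succ d ihd =>
    intro t hT
    have ht : t < F.length := by omega
    obtain ⟨IHa, IHb, IHc⟩ := ihd (t + 1) (by omega)
    have hdrop : F.drop t = (F[t]'ht) :: F.drop (t + 1) := (List.getElem_cons_drop ht).symm
    rcases hFt : F[t]'ht with ⟨node, par⟩
    rw [hFt] at hdrop
    set g := pvAdj edges with hg
    set Rn := (F.drop (t + 1)).foldr (fun e acc => pvDpStep g values acc e)
        (List.replicate values.length (none : Option (Int × Int))) with hRn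
    have hRstep : (F.drop t).foldr (fun e acc => pvDpStep g values acc e)
        (List.replicate values.length (none : Option (Int × Int)))
        = pvDpStep g values Rn (node, par) := by
      rw [hdrop, List.foldr_cons]
    have hnode_range : (0 : Int) ≤ node ∧ node < (values.length : Int) := by
      have := inv.hrange (F[t]'ht) (List.getElem_mem ht)
      rwa [hFt] at this
    have hnode_lt : node.toNat < values.length := by omega
    -- P2 dichotomy at entry t
    have hp2 := pv_p2 edges values.length visF F inv hpre3 t ht
    rw [hFt] at hp2
    -- the parent's slot is still empty
    have hnone_of_parent : ∀ c : Int, (0 : Int) ≤ c → c < (values.length : Int) →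
        par = some c → Rn.getD c.toNat none = none := by
      intro c hc0 hc1 hpc
      apply IHb c hc0 hc1
      intro j hj hjt heq
      have ht0 : 0 < t := by
        rcases Nat.eq_zero_or_pos t with rfl | h
        · exfalso
          have := pv_F_zero edges values.length visF F inv ht
          rw [hFt] at this
          have : par = none := by simp [Prod.ext_iff] at this; exact this.2
          rw [this] at hpc
          simp at hpc
        · exact h
      rcases inv.hparent t ht ht0 with ⟨i', hi', hlt, hp2', _⟩
      rw [hFt] at hp2'
      have hci' : c = (F[i']'hi').1 := by
        rw [hpc] at hp2'
        exact Option.some.inj hp2'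
      have : j = i' := by
        apply pv_ix_inj F inv.hnodup j i' hj hi'
        rw [heq, hci']
      omega
    -- pointwise: "result present" = "not the parent"
    have hfc : ∀ c ∈ g.getD node [], (Rn.getD c.toNat none).isSome = !(decide (some c = par)) := by
      intro c hcm
      have hnr : node ∈ pvReach edges := by
        have := inv.hreach (F[t]'ht) (List.getElem_mem ht)
        rwa [hFt] at this
      have hcr := pv_nb_range edges (values.length : Int) hshape node c hnr hcm
      rcases hp2 c hcm with hcase | ⟨k, hk, hkt, hkc, hkp⟩
      · have hpc : par = some c := hcase
        have hdec : decide (some c = par) = true := by simp [hpc]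
        rw [hdec]
        have := hnone_of_parent c hcr.2.2.1 hcr.2.2.2.1 hpc
        rw [List.getD_eq_getElem?_getD] at this
        simp [this]
      · have hne : ¬ (some c = par) := by
          intro hpc
          have ht0 : 0 < t := by
            rcases Nat.eq_zero_or_pos t with rfl | h
            · exfalso
              have := pv_F_zero edges values.length visF F inv ht
              rw [hFt] at this
              have hpn : par = none := by simp [Prod.ext_iff] at this; exact this.2
              rw [hpn] at hpc
              simp at hpc
            · exact h
          rcases inv.hparent t ht ht0 with ⟨i', hi', hlt, hp2', _⟩
          rw [hFt] at hp2'
          have hci' : c = (F[i']'hi').1 := by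
            rw [← hpc] at hp2'
            exact Option.some.inj hp2'
          have : k = i' := by
            apply pv_ix_inj F inv.hnodup k i' hk hi'
            rw [hkc, hci']
          omega
        have hKa := (IHa k hk (by omega)).1
        have hKs := (IHa k hk (by omega)).2
        rw [hkc] at hKa hKs
        have hdec : decide (some c = par) = false := by simp [hne]
        rw [hdec, hKa]
        simp [hKs]
    have hchildren : (g.getD node []).filter (fun c => (Rn.getD c.toNat none).isSome)
        = (g.getD node []).filter (fun c => !(decide (some c = par))) :=
      List.filter_congr hfc
    -- the recursive calls agree with the stored results
    have hval : ∀ c ∈ g.getD node [], ¬ (some c = par) →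
        pvDfs g values (F.length - (t + 1)) c (some node)
          = some ((Rn.getD c.toNat none).getD ((0 : Int), (0 : Int))) := by
      intro c hcm hne
      rcases hp2 c hcm with hcase | ⟨k, hk, hkt, hkc, hkp⟩
      · exact absurd (hcase ▸ rfl) hne
      · have hKa := (IHa k hk (by omega)).1
        have hKs := (IHa k hk (by omega)).2
        rw [hkc, hkp] at hKa hKs
        rcases hsome : pvDfs g values (F.length - k) c (some node) with _ | pr
        · rw [hsome] at hKs
          simp at hKs
        · have hmono := pv_dfs_mono g values (F.length - k) (F.length - (t + 1)) c (some node) pr hsome (by omega)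
          rw [hmono, hKa, hsome]
          simp
    -- evaluate the DFS at this node
    have hfuel : F.length - t = (F.length - (t + 1)) + 1 := by omega
    have hdfs : pvDfs g values (F.length - t) node par
        = some (values.getD node.toNat 0 +
              (((g.getD node []).filter (fun c => !(decide (some c = par)))).map
                (fun c => ((Rn.getD c.toNat none).getD ((0 : Int), (0 : Int))).1)).sum,
            if !((g.getD node []).filter (fun c => !(decide (some c = par)))).isEmpty then
              max (((g.getD node []).filter (fun c => !(decide (some c = par)))).map
                    (fun c => ((Rn.getD c.toNat none).getD ((0 : Int), (0 : Int))).1)).sum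
                  (values.getD node.toNat 0 +
                    (((g.getD node []).filter (fun c => !(decide (some c = par)))).map
                      (fun c => ((Rn.getD c.toNat none).getD ((0 : Int), (0 : Int))).2)).sum)
            else 0) := by
      rw [hfuel, pvDfs]
      rw [pv_dfs_fold_char g values (F.length - (t + 1)) node par
        (fun c => (Rn.getD c.toNat none).getD ((0 : Int), (0 : Int))) (g.getD node []) hval 0 0 false]
      simp
    -- the A-side step writes exactly that pair (modulo the two spellings of the if)
    have hflip : ∀ (l : List Int) (X Y : Int),
        (if !l.isEmpty then X else Y) = if l.length = 0 then Y else X := by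
      intro l X Y
      cases l <;> simp
    have hstep2 : pvDpStep g values Rn (node, par)
        = Rn.set node.toNat (some
            (values.getD node.toNat 0 +
              (((g.getD node []).filter (fun c => !(decide (some c = par)))).map
                (fun c => ((Rn.getD c.toNat none).getD ((0 : Int), (0 : Int))).1)).sum,
            if ((g.getD node []).filter (fun c => !(decide (some c = par)))).length = 0 then 0 else
              max (((g.getD node []).filter (fun c => !(decide (some c = par)))).map
                    (fun c => ((Rn.getD c.toNat none).getD ((0 : Int), (0 : Int))).1)).sum
                  (values.getD node.toNat 0 +
                    (((g.getD node []).filter (fun c => !(decide (some c = par)))).map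
                      (fun c => ((Rn.getD c.toNat none).getD ((0 : Int), (0 : Int))).2)).sum))) := by
      simp only [pvDpStep, hchildren]
    have hRlen : Rn.length = values.length := IHc
    have hset_self : (Rn.set node.toNat (some
            (values.getD node.toNat 0 +
              (((g.getD node []).filter (fun c => !(decide (some c = par)))).map
                (fun c => ((Rn.getD c.toNat none).getD ((0 : Int), (0 : Int))).1)).sum,
            if ((g.getD node []).filter (fun c => !(decide (some c = par)))).length = 0 then 0 else
              max (((g.getD node []).filter (fun c => !(decide (some c = par)))).map
                    (fun c => ((Rn.getD c.toNat none).getD ((0 : Int), (0 : Int))).1)).sum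
                  (values.getD node.toNat 0 +
                    (((g.getD node []).filter (fun c => !(decide (some c = par)))).map
                      (fun c => ((Rn.getD c.toNat none).getD ((0 : Int), (0 : Int))).2)).sum)))).getD node.toNat none
        = some
            (values.getD node.toNat 0 +
              (((g.getD node []).filter (fun c => !(decide (some c = par)))).map
                (fun c => ((Rn.getD c.toNat none).getD ((0 : Int), (0 : Int))).1)).sum,
            if ((g.getD node []).filter (fun c => !(decide (some c = par)))).length = 0 then 0 else
              max (((g.getD node []).filter (fun c => !(decide (some c = par)))).map
                    (fun c => ((Rn.getD c.toNat none).getD ((0 : Int), (0 : Int))).1)).sum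
                  (values.getD node.toNat 0 +
                    (((g.getD node []).filter (fun c => !(decide (some c = par)))).map
                      (fun c => ((Rn.getD c.toNat none).getD ((0 : Int), (0 : Int))).2)).sum)) := by
      rw [List.getD_eq_getElem?_getD, List.getElem?_set_self (by omega)]
      rfl
    have hset_ne : ∀ (w : Int), 0 ≤ w → w ≠ node →
        (pvDpStep g values Rn (node, par)).getD w.toNat none = Rn.getD w.toNat none := by
      intro w hw0 hwne
      rw [hstep2, List.getD_eq_getElem?_getD,
        List.getElem?_set_ne (by omega), ← List.getD_eq_getElem?_getD]
    have hdfs_eq : pvDfs g values (F.length - t) node par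
        = some
            (values.getD node.toNat 0 +
              (((g.getD node []).filter (fun c => !(decide (some c = par)))).map
                (fun c => ((Rn.getD c.toNat none).getD ((0 : Int), (0 : Int))).1)).sum,
            if ((g.getD node []).filter (fun c => !(decide (some c = par)))).length = 0 then 0 else
              max (((g.getD node []).filter (fun c => !(decide (some c = par)))).map
                    (fun c => ((Rn.getD c.toNat none).getD ((0 : Int), (0 : Int))).1)).sum
                  (values.getD node.toNat 0 +
                    (((g.getD node []).filter (fun c => !(decide (some c = par)))).map
                      (fun c => ((Rn.getD c.toNat none).getD ((0 : Int), (0 : Int))).2)).sum)) := by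
      rw [hdfs]
      congr 1
      rw [hflip]
    refine ⟨?_, ?_, ?_⟩
    · intro j hj hjt
      rw [hRstep]
      by_cases hjT : j = t
      · subst hjT
        rw [hFt]
        show (pvDpStep g values Rn (node, par)).getD node.toNat none
            = pvDfs g values (F.length - j) node par
          ∧ (pvDfs g values (F.length - j) node par).isSome
        constructor
        · rw [hstep2, hset_self, hdfs_eq]
        · rw [hdfs_eq]
          rfl
      · have hjt1 : t + 1 ≤ j := by omega
        have hne : (F[j]'hj).1 ≠ node := by
          intro heq
          apply hjT
          apply pv_ix_inj F inv.hnodup j t hj ht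
          rw [heq, hFt]
        have hge0 : (0 : Int) ≤ (F[j]'hj).1 := (inv.hrange _ (List.getElem_mem hj)).1
        rw [hset_ne _ hge0 hne]
        exact IHa j hj hjt1
    · intro u h0 h1 hno
      rw [hRstep]
      have hnode_ne : (F[t]'ht).1 ≠ u := hno t ht (le_refl t)
      rw [hFt] at hnode_ne
      rw [hset_ne u h0 (Ne.symm hnode_ne)]
      apply IHb u h0 h1
      intro j hj hjt1
      exact hno j hj (by omega)
    · rw [hRstep, hstep2]
      simp [hRlen]

-- ===== VERDICT (by name: the statement is the Claim_ definition above) =====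
theorem maximumScoreAfterOperations_spec : Claim_equal_maximumScoreAfterOperations := by
  intro edges values _hdom hpre
  unfold Spec_maximumScoreAfterOperations
  obtain ⟨hn, _hlen2, hshape, hnd, hpre3⟩ := hpre
  obtain ⟨visF, inv⟩ := pv_final_inv edges values.length hshape hnd hn
  set F := pvGenerateSortedList (pvAdj edges) values.length with hF
  have hm1 : 0 < F.length := pv_F_nonempty edges values.length visF F inv
  have hF0 := pv_F_zero edges values.length visF F inv hm1
  obtain ⟨Qa, Qb, Qc⟩ := pv_dp_suffix edges values visF F inv hshape hnd hpre3 F.length 0 (by omega)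
  have h0 := Qa 0 hm1 (by omega)
  simp only [List.drop_zero, hF0, Nat.sub_zero, Int.toNat_zero] at h0
  obtain ⟨pr, hpr⟩ := Option.isSome_iff_exists.1 h0.2
  have hlen : F.length ≤ values.length := pv_len_le values.length F inv.hnodup inv.hrange
  have hmono := pv_dfs_mono (pvAdj edges) values F.length (values.length + 1) 0 none pr hpr (by omega)
  simp only [maximumScoreAfterOperations, maximumScoreAfterOperations_alt]
  rw [List.foldl_reverse, ← hF]
  rw [h0.1, hpr, hmono]
  rfl
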